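-- pv_equiv track=rewrite | github.com/khelwood/advent-of-code | 2018/regular_maze.py | run_path
-- ===== SOURCE A (Python) =====
-- DIRECTIONS = { 'N': (0,-1), 'E': (1,0), 'S': (0,1), 'W':  (-1,0) }
--
-- def addp(a,b):
--     return (a[0]+b[0], a[1]+b[1])
--
-- def run_path(start, path, doors, dirs=DIRECTIONS):
--     cur = start
--     for ch in path:
--         new = addp(cur, dirs[ch])
--         doors[cur].add(new)
--         doors[new].add(cur)
--         cur = new
--     return cur
-- ===== SOURCE B (Python) =====
-- def run_path(start, path, doors, dirs={ 'N': (0,-1), 'E': (1,0), 'S': (0,1), 'W': (-1,0) }):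
--     # Two-phase: materialize the whole trajectory first, then record doors pairwise.
--     positions = [start]
--     for ch in path:
--         last = positions[-1]
--         d = dirs[ch]
--         positions.append((last[0] + d[0], last[1] + d[1]))
--     for a, b in zip(positions, positions[1:]):
--         doors[a].add(b)
--         doors[b].add(a)
--     return positions[-1]
-- ===== Notes on version B (the rewrite author's own statement) =====
-- stated objective: alternative
-- what changed: A fuses walking and door-recording in one loop; B first materializes the whole trajectory as a list, then records doors pairwise over zip(positions, positions[1:]) and returns positions[-1].
import Mathlib
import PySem

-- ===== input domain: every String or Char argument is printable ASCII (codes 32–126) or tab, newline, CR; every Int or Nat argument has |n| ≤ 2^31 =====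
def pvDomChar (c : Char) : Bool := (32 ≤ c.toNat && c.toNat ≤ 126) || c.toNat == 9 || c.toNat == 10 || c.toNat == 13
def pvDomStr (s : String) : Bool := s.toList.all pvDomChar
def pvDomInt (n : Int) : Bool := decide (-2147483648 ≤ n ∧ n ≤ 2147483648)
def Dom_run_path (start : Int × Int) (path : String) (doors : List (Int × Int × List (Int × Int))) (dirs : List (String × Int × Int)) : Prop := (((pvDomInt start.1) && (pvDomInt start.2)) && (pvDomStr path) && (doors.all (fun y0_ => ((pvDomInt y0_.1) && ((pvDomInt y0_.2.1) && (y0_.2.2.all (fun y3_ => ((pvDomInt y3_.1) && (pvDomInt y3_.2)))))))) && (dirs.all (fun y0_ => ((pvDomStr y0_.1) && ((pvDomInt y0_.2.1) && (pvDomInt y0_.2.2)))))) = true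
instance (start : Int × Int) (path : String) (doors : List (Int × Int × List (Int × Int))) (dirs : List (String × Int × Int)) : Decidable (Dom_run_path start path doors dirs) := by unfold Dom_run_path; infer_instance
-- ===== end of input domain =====

-- B replaces A's fused walk-and-record loop by a two-phase pass (materialize the whole
-- trajectory, then record doors over consecutive pairs); objective: alternative decomposition,
-- same cost. A mutates blobs inside `doors` in place; B performs the same mutations on inputs
-- satisfying Pre_, and the equivalence proved here is about the RETURN value.

-- ===== PORT A =====
-- addp(a, b)
def pvAddp (a b : Int × Int) : Int × Int := (a.1 + b.1, a.2 + b.2)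

-- the doors dict: key (x, y), value the set of neighbours (flattened triples in the list form)
def pvDoorsDict (doors : List (Int × Int × List (Int × Int))) : PySem.Dict (Int × Int) (List (Int × Int)) :=
  PySem.Dict.ofList (doors.map (fun p => ((p.1, p.2.1), p.2.2)))

-- dirs[ch] for a one-character string ch; `none` (Python KeyError) replaced by (0,0) only
-- outside Pre_run_path. Dict.ofList reads the association list the way dict(pairs) does.
def pvDirGet (dirs : List (String × Int × Int)) (ch : Char) : Int × Int :=
  ((PySem.Dict.ofList dirs).get? (String.singleton ch)).getD (0, 0)

def run_path (start : Int × Int) (path : String) (doors : List (Int × Int × List (Int × Int))) (dirs : List (String × Int × Int)) : Int × Int :=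
  (path.toList.foldl
    (fun (st : (Int × Int) × PySem.Dict (Int × Int) (List (Int × Int))) ch =>
      let cur := st.1
      let new := pvAddp cur (pvDirGet dirs ch)
      -- doors[cur].add(new); doors[new].add(cur): a missing key raises KeyError in Python,
      -- excluded by Pre_run_path; `modify` with default [] is exact on present keys.
      let d1 := st.2.modify cur [] (fun s => PySem.Set.add s new)
      let d2 := d1.modify new [] (fun s => PySem.Set.add s cur)
      (new, d2))
    (start, pvDoorsDict doors)).1

-- ===== PORT B =====
def run_path_alt (start : Int × Int) (path : String) (doors : List (Int × Int × List (Int × Int))) (dirs : List (String × Int × Int)) : Int × Int :=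
  -- phase 1: materialize the trajectory (positions[-1] is pyGetD ps (-1) _; ps is never empty)
  let positions := path.toList.foldl
    (fun (ps : List (Int × Int)) ch =>
      let last := PySem.List.pyGetD ps (-1) (0, 0)
      let d := pvDirGet dirs ch
      ps ++ [(last.1 + d.1, last.2 + d.2)])
    [start]
  -- phase 2: record doors over consecutive pairs (in-place mutation in Python; see header)
  let _doors2 := (positions.zip positions.tail).foldl
    (fun (d : PySem.Dict (Int × Int) (List (Int × Int))) ab =>
      let d1 := d.modify ab.1 [] (fun s => PySem.Set.add s ab.2)
      d1.modify ab.2 [] (fun s => PySem.Set.add s ab.1))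
    (pvDoorsDict doors)
  PySem.List.pyGetD positions (-1) (0, 0)

-- ===== PRECONDITION & SPEC =====
-- the list of positions the walk visits (start included only when the path is nonempty,
-- since Python touches `doors` only inside the loop)
def pvScan (dirs : List (String × Int × Int)) : Int × Int → List Char → List (Int × Int)
  | cur, [] => [cur]
  | cur, ch :: rest => cur :: pvScan dirs (pvAddp cur (pvDirGet dirs ch)) rest

-- Pre_ excludes exactly the inputs on which A raises KeyError: a path character that is not a
-- key of dirs, or a visited position that is not a key of doors.
def Pre_run_path (start : Int × Int) (path : String) (doors : List (Int × Int × List (Int × Int))) (dirs : List (String × Int × Int)) : Prop :=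
  (path.toList.all (fun ch => (PySem.Dict.ofList dirs).contains (String.singleton ch)) = true) ∧
  (path.toList ≠ [] → ∀ p ∈ pvScan dirs start path.toList, p ∈ doors.map (fun q => (q.1, q.2.1)))
instance (start : Int × Int) (path : String) (doors : List (Int × Int × List (Int × Int))) (dirs : List (String × Int × Int)) : Decidable (Pre_run_path start path doors dirs) := by unfold Pre_run_path; infer_instance

def pvWitness_run_path : (Int × Int) × String × (List (Int × Int × List (Int × Int))) × (List (String × Int × Int)) :=
  ((0, 0), "NE", [(0, 0, []), (0, -1, []), (1, -1, [])],
   [("N", (0, -1)), ("E", (1, 0)), ("S", (0, 1)), ("W", (-1, 0))])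

def Spec_run_path (start : Int × Int) (path : String) (doors : List (Int × Int × List (Int × Int))) (dirs : List (String × Int × Int)) (out : Int × Int) : Prop := out = run_path_alt start path doors dirs
instance (start : Int × Int) (path : String) (doors : List (Int × Int × List (Int × Int))) (dirs : List (String × Int × Int)) (out : Int × Int) : Decidable (Spec_run_path start path doors dirs out) := by unfold Spec_run_path; infer_instance

-- ===== CLAIM (what is proved, stated in full; the proofs are below) =====
def Claim_equal_run_path : Prop := ∀ (start : Int × Int) (path : String) (doors : List (Int × Int × List (Int × Int))) (dirs : List (String × Int × Int)), Dom_run_path start path doors dirs → Pre_run_path start path doors dirs → Spec_run_path start path doors dirs (run_path start path doors dirs)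

-- ===== LEMMAS AND PROOFS =====

-- the first component of A's fold ignores the doors state
theorem runA_fst (chars : List Char) (dirs : List (String × Int × Int)) :
    ∀ (cur : Int × Int) (d : PySem.Dict (Int × Int) (List (Int × Int))),
    (chars.foldl
      (fun (st : (Int × Int) × PySem.Dict (Int × Int) (List (Int × Int))) ch =>
        let cur := st.1
        let new := pvAddp cur (pvDirGet dirs ch)
        let d1 := st.2.modify cur [] (fun s => PySem.Set.add s new)
        let d2 := d1.modify new [] (fun s => PySem.Set.add s cur)
        (new, d2)) (cur, d)).1
    = chars.foldl (fun c ch => pvAddp c (pvDirGet dirs ch)) cur := by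
  induction chars with
  | nil => intro cur d; rfl
  | cons ch rest ih => intro cur d; simp only [List.foldl]; exact ih _ _

-- positions[-1] of a snoc
theorem pyGetD_neg_one_append (ps : List (Int × Int)) (x : Int × Int) :
    PySem.List.pyGetD (ps ++ [x]) (-1) (0, 0) = x := by
  simp [PySem.List.pyGetD, PySem.List.pyGet?, PySem.List.pyIdx?]

-- the last element of B's phase-1 fold is A's walk
theorem runB_last (dirs : List (String × Int × Int)) :
    ∀ (chars : List Char) (ps : List (Int × Int)) (cur : Int × Int),
    ps ≠ [] → PySem.List.pyGetD ps (-1) (0, 0) = cur →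
    PySem.List.pyGetD
      (chars.foldl
        (fun (ps : List (Int × Int)) ch =>
          let last := PySem.List.pyGetD ps (-1) (0, 0)
          let d := pvDirGet dirs ch
          ps ++ [(last.1 + d.1, last.2 + d.2)]) ps)
      (-1) (0, 0)
    = chars.foldl (fun c ch => pvAddp c (pvDirGet dirs ch)) cur := by
  intro chars
  induction chars with
  | nil => intro ps cur _ h; simpa using h
  | cons ch rest ih =>
    intro ps cur hne h
    simp only [List.foldl]
    refine ih _ _ (by simp) ?_
    rw [pyGetD_neg_one_append, h]
    rfl

-- ===== VERDICT (by name: the statement is the Claim_ definition above) =====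
theorem run_path_spec : Claim_equal_run_path := by
  intro start path doors dirs _ _
  unfold Spec_run_path run_path run_path_alt
  rw [runA_fst, runB_last dirs path.toList [start] start (by simp)
      (by simp [PySem.List.pyGetD, PySem.List.pyGet?, PySem.List.pyIdx?])]
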